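-- pv_equiv track=rewrite | github.com/AanchalALC/Another-Light-Counselling | main/views.py | get_review_doodle_list
-- ===== SOURCE A (Python) =====
-- def get_review_doodle_list(reviews):
--     # CREATE NEEDED OBJECTS
--     left_item = {
--         'type': 'doodle',
--         'position': 'left',
--         'art': 'img/reviews/left_arrow1.png'
--     }
--
--     right_item_1 = {
--         'type': 'doodle',
--         'position': 'right',
--         'art': 'img/reviews/right_arrow.png'
--     }
--
--     right_item_2 = {
--         'type': 'doodle',
--         'position': 'right',
--         'art': 'img/reviews/left_arrow2.png'
--     }
--
--     review_item = {
--         'type': 'review',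
--         'position': 'any',
--         'obj': None
--     }
--
--
--
--
--
--
--     # INITIALISE LIST AND OTHER VARS
--     review_list = []
--
--     # VARIABLES NEEDED
--     review_indices = []
--     num_of_cells = len(reviews) * 2
--
--     # DECIDE REVIEW INDICES
--     for i in range(0, num_of_cells):
--         curr = i
--         nex = i+1
--         prev = i-1
--
--         if curr == 0:
--             continue
--
--         if ( nex % 2 == 0 ) and ( nex % 4 != 0 ):
--             review_indices.append(curr)
--             continue
--
--         if ( curr % 2 == 0 ) and ( curr % 4 != 0 ):
--             review_indices.append(curr)
--             continue
--
--
--     # NOW FILL IN THE POSITIONS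
--     review_head = 0
--
--     for i in range(0, num_of_cells):
--
--         # FIRST CELL OR IF THE CELL IS A MULTIPLE OF 4, IT'S A LEFT DOODLE
--         # AND IS NOT SECOND LAST
--         if ( i == 0 ) or ( i % 4 == 0 ):
--             # SECOND LAST MUST BE EMPTY
--             if ( i + 1 < num_of_cells-1 ):
--                 review_list.append({
--                     'type': 'doodle',
--                     'position': 'left',
--                     'art': 'img/reviews/left_arrow1.png'
--                 })
--             else:
--                 review_list.append({
--                     'type': 'doodle',
--                     'position': 'left',
--                     'art': ''
--                 })
--
--         # IF THE PLACE IS FOR A REVIEW, ADD A REVIEW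
--         if i in review_indices:
--             review_list.append({
--                 'type': 'review',
--                 'position': 'left' if i%2==0 else 'right',
--                 'obj': reviews[review_head]
--             })
--             review_head += 1
--             continue
--
--         # IF THE CELL IS ODD AND THE NEXT CELL IS A MULTIPLE OF 4, IT'S A RIGHT DOODLE
--         # ONLY IF THIS ISN'T THE LAST ELEMENT
--         if ( i % 2 != 0 ) and ( (i+1) % 4 == 0 ) and ( i < num_of_cells - 1 ):
--             review_list.append(right_item_1)
--             continue
--
--     return review_list
-- ===== SOURCE B (Python) =====
-- def get_review_doodle_list(reviews):
--     # One pass over the reviews in pairs: no precomputed index table, no membership scans.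
--     n = len(reviews)
--     layout = []
--     k = 0
--     while k < n:
--         layout.append({
--             'type': 'doodle',
--             'position': 'left',
--             'art': '' if k >= n - 1 else 'img/reviews/left_arrow1.png'
--         })
--         layout.append({'type': 'review', 'position': 'right', 'obj': reviews[k]})
--         if k + 1 < n:
--             layout.append({'type': 'review', 'position': 'left', 'obj': reviews[k + 1]})
--             if k + 2 < n:
--                 layout.append({'type': 'doodle', 'position': 'right', 'art': 'img/reviews/right_arrow.png'})
--         k += 2
--     return layout
-- ===== Notes on version B (the rewrite author's own statement) =====
-- stated objective: faster
-- what changed: Replaces A's precomputed review-index table and the per-cell linear membership scan ('i in review_indices') with a single pass over the reviews in pairs, emitting each up-to-4-cell block directly.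
import Mathlib
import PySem

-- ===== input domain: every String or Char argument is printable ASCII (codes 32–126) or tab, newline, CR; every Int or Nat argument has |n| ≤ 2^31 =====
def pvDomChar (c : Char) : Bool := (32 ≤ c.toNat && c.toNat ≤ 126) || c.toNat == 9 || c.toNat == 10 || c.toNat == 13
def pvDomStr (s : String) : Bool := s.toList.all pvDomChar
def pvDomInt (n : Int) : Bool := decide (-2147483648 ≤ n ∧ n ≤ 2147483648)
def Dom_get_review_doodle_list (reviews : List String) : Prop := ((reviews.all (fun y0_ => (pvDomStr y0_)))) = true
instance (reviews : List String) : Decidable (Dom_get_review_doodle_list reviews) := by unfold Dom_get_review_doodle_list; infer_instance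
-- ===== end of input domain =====

-- B replaces A's precomputed review-index table and per-cell membership scans by a single
-- pass over the reviews in pairs (one block of up to four cells per pair).

-- ===== PORT A =====
-- body of A's first loop ("DECIDE REVIEW INDICES")
def pvIdxStep (acc : List Int) (i : Int) : List Int :=
  if i = 0 then acc
  else if PySem.Int.mod (i + 1) 2 = 0 ∧ PySem.Int.mod (i + 1) 4 ≠ 0 then acc ++ [i]
  else if PySem.Int.mod i 2 = 0 ∧ PySem.Int.mod i 4 ≠ 0 then acc ++ [i]
  else acc

-- body of A's second loop ("NOW FILL IN THE POSITIONS"); state = (review_list, review_head)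
-- reviews[review_head] never goes out of range in A, so the .getD "" default is unreachable
def pvCellStep (reviews : List String) (num_of_cells : Int) (review_indices : List Int)
    (st : List (List (String × String)) × Int) (i : Int) :
    List (List (String × String)) × Int :=
  let review_list :=
    if i = 0 ∨ PySem.Int.mod i 4 = 0 then
      if i + 1 < num_of_cells - 1 then
        st.1 ++ [[("type", "doodle"), ("position", "left"), ("art", "img/reviews/left_arrow1.png")]]
      else
        st.1 ++ [[("type", "doodle"), ("position", "left"), ("art", "")]]
    else st.1
  if i ∈ review_indices then
    (review_list ++ [[("type", "review"),
        ("position", if PySem.Int.mod i 2 = 0 then "left" else "right"),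
        ("obj", (PySem.List.pyGet? reviews st.2).getD "")]], st.2 + 1)
  else if PySem.Int.mod i 2 ≠ 0 ∧ PySem.Int.mod (i + 1) 4 = 0 ∧ i < num_of_cells - 1 then
    (review_list ++ [[("type", "doodle"), ("position", "right"), ("art", "img/reviews/right_arrow.png")]], st.2)
  else (review_list, st.2)

def get_review_doodle_list (reviews : List String) : List (List (String × String)) :=
  let num_of_cells : Int := (reviews.length : Int) * 2
  let review_indices := (PySem.List.pyRange 0 num_of_cells).foldl pvIdxStep []
  ((PySem.List.pyRange 0 num_of_cells).foldl
      (pvCellStep reviews num_of_cells review_indices) ([], 0)).1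

-- ===== PORT B =====
-- the while-loop of Source B; reviews[k] / reviews[k+1] are always in range, .getD "" unreachable
def pvAltLoop (reviews : List String) (n : Int)
    (layout : List (List (String × String))) (k : Int) :
    List (List (String × String)) :=
  if h : k < n then
    let layout := layout ++ [[("type", "doodle"), ("position", "left"),
        ("art", if k ≥ n - 1 then "" else "img/reviews/left_arrow1.png")]]
    let layout := layout ++ [[("type", "review"), ("position", "right"),
        ("obj", (PySem.List.pyGet? reviews k).getD "")]]
    let layout :=
      if k + 1 < n then
        let layout := layout ++ [[("type", "review"), ("position", "left"),
            ("obj", (PySem.List.pyGet? reviews (k + 1)).getD "")]]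
        if k + 2 < n then
          layout ++ [[("type", "doodle"), ("position", "right"), ("art", "img/reviews/right_arrow.png")]]
        else layout
      else layout
    pvAltLoop reviews n layout (k + 2)
  else layout
termination_by (n - k).toNat
decreasing_by omega

def get_review_doodle_list_alt (reviews : List String) : List (List (String × String)) :=
  pvAltLoop reviews (reviews.length : Int) [] 0

-- ===== PRECONDITION & SPEC =====
def Spec_get_review_doodle_list (reviews : List String) (out : List (List (String × String))) : Prop := out = get_review_doodle_list_alt reviews
instance (reviews : List String) (out : List (List (String × String))) : Decidable (Spec_get_review_doodle_list reviews out) := by unfold Spec_get_review_doodle_list; infer_instance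

-- ===== CLAIM (what is proved, stated in full; the proofs are below) =====
def Claim_equal_get_review_doodle_list : Prop := ∀ (reviews : List String), Dom_get_review_doodle_list reviews → Spec_get_review_doodle_list reviews (get_review_doodle_list reviews)

-- ===== LEMMAS AND PROOFS =====

-- A's review_indices are exactly the cells ≡ 1 or 2 (mod 4) below num_of_cells
lemma pv_mem_idx {N i : Int} :
    i ∈ (PySem.List.pyRange 0 N).foldl pvIdxStep [] ↔
      0 ≤ i ∧ i < N ∧ (i % 4 = 1 ∨ i % 4 = 2) := by
  have hstep : ∀ (acc : List Int) (x : Int), pvIdxStep acc x =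
      if (decide (x % 4 = 1 ∨ x % 4 = 2)) = true then acc ++ [id x] else acc := by
    intro acc x
    simp only [pvIdxStep, PySem.Int.mod_eq_emod_of_pos (by norm_num : (0:Int) < 2),
      PySem.Int.mod_eq_emod_of_pos (by norm_num : (0:Int) < 4), decide_eq_true_eq, id]
    split_ifs <;> first | rfl | omega
  rw [PySem.List.foldl_congr_mem _ _ _ _ (fun acc x _ => hstep acc x),
    PySem.List.foldl_append_if]
  simp [List.mem_filter, PySem.List.mem_pyRange_one]
  tauto

lemma pv_step0 (reviews : List String) (N : Int) (idx : List Int)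
    (acc : List (List (String × String))) (hd i : Int)
    (h4 : i % 4 = 0)
    (hmem : ∀ j ∈ idx, j % 4 = 1 ∨ j % 4 = 2) :
    pvCellStep reviews N idx (acc, hd) i =
      (acc ++ [[("type", "doodle"), ("position", "left"),
        ("art", if i + 1 < N - 1 then "img/reviews/left_arrow1.png" else "")]], hd) := by
  have hni : i ∉ idx := fun h => by have := hmem i h; omega
  simp only [pvCellStep, PySem.Int.mod_eq_emod_of_pos (by norm_num : (0:Int) < 2),
    PySem.Int.mod_eq_emod_of_pos (by norm_num : (0:Int) < 4), hni]
  split_ifs <;> simp_all <;> omega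

lemma pv_step1 (reviews : List String) (N : Int) (idx : List Int)
    (acc : List (List (String × String))) (hd i : Int)
    (h4 : i % 4 = 1) (hmem : i ∈ idx) :
    pvCellStep reviews N idx (acc, hd) i =
      (acc ++ [[("type", "review"), ("position", "right"),
        ("obj", (PySem.List.pyGet? reviews hd).getD "")]], hd + 1) := by
  simp only [pvCellStep, PySem.Int.mod_eq_emod_of_pos (by norm_num : (0:Int) < 2),
    PySem.Int.mod_eq_emod_of_pos (by norm_num : (0:Int) < 4), if_pos hmem]
  split_ifs <;> simp_all <;> omega

lemma pv_step2 (reviews : List String) (N : Int) (idx : List Int)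
    (acc : List (List (String × String))) (hd i : Int)
    (h4 : i % 4 = 2) (hmem : i ∈ idx) :
    pvCellStep reviews N idx (acc, hd) i =
      (acc ++ [[("type", "review"), ("position", "left"),
        ("obj", (PySem.List.pyGet? reviews hd).getD "")]], hd + 1) := by
  simp only [pvCellStep, PySem.Int.mod_eq_emod_of_pos (by norm_num : (0:Int) < 2),
    PySem.Int.mod_eq_emod_of_pos (by norm_num : (0:Int) < 4), if_pos hmem]
  split_ifs <;> simp_all <;> omega

lemma pv_step3 (reviews : List String) (N : Int) (idx : List Int)
    (acc : List (List (String × String))) (hd i : Int)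
    (h4 : i % 4 = 3)
    (hmem : ∀ j ∈ idx, j % 4 = 1 ∨ j % 4 = 2) :
    pvCellStep reviews N idx (acc, hd) i =
      (acc ++ (if i < N - 1 then
          [[("type", "doodle"), ("position", "right"), ("art", "img/reviews/right_arrow.png")]]
        else []), hd) := by
  have hni : i ∉ idx := fun h => by have := hmem i h; omega
  simp only [pvCellStep, PySem.Int.mod_eq_emod_of_pos (by norm_num : (0:Int) < 2),
    PySem.Int.mod_eq_emod_of_pos (by norm_num : (0:Int) < 4), if_neg hni]
  split_ifs <;> simp_all <;> omega

-- main invariant: from block b on, A's remaining fold produces what B's loop produces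
lemma pvBase (reviews : List String) (b : Nat) (acc : List (List (String × String)))
    (hb : reviews.length ≤ 2 * b) :
    ((PySem.List.pyRange (↑(4 * b)) ((reviews.length : Int) * 2)).foldl
        (pvCellStep reviews ((reviews.length : Int) * 2)
          ((PySem.List.pyRange 0 ((reviews.length : Int) * 2)).foldl pvIdxStep []))
        (acc, (↑(2 * b) : Int))).1
      = pvAltLoop reviews (reviews.length : Int) acc (↑(2 * b)) := by
  have hrange : PySem.List.pyRange ((↑(4 * b) : Int)) ((reviews.length : Int) * 2) = [] := by
    rw [List.eq_nil_iff_forall_not_mem]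
    intro x hx
    rw [PySem.List.mem_pyRange_one] at hx
    omega
  rw [hrange, pvAltLoop]
  simp only [List.foldl_nil]
  rw [dif_neg (by omega : ¬ ((↑(2 * b) : Int) < (reviews.length : Int)))]

lemma pvMain (reviews : List String) (m : Nat) :
    ∀ (b : Nat) (rest : List String) (acc : List (List (String × String))),
      rest.length ≤ m →
      reviews.drop (2 * b) = rest →
      ((PySem.List.pyRange (↑(4 * b)) ((reviews.length : Int) * 2)).foldl
          (pvCellStep reviews ((reviews.length : Int) * 2)
            ((PySem.List.pyRange 0 ((reviews.length : Int) * 2)).foldl pvIdxStep []))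
          (acc, (↑(2 * b) : Int))).1
        = pvAltLoop reviews (reviews.length : Int) acc (↑(2 * b)) := by
  induction m with
  | zero =>
    intro b rest acc hm hdrop
    have hrest : rest = [] := by cases rest <;> simp_all
    subst hrest
    exact pvBase reviews b acc (List.drop_eq_nil_iff.mp hdrop)
  | succ m ih =>
    intro b rest acc hm hdrop
    have hmemall : ∀ j ∈ (PySem.List.pyRange 0 ((reviews.length : Int) * 2)).foldl pvIdxStep [],
        j % 4 = 1 ∨ j % 4 = 2 := fun j hj => (pv_mem_idx.mp hj).2.2
    rcases rest with _ | ⟨r1, rest1⟩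
    · exact pvBase reviews b acc (List.drop_eq_nil_iff.mp hdrop)
    rcases rest1 with _ | ⟨r2, rest2⟩
    · -- one review left: cells 4b (empty-art left doodle) and 4b+1 (the review), then done
      have hlen : reviews.length = 2 * b + 1 := by
        have h := congrArg List.length hdrop
        simp [List.length_drop] at h
        omega
      have hempty : PySem.List.pyRange ((↑(4 * b) : Int) + 1 + 1) ((reviews.length : Int) * 2) = [] := by
        rw [List.eq_nil_iff_forall_not_mem]
        intro x hx
        rw [PySem.List.mem_pyRange_one] at hx
        omega
      rw [PySem.List.pyRange_one_cons (by omega : ((↑(4 * b) : Int)) < (reviews.length : Int) * 2),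
        List.foldl_cons, pv_step0 _ _ _ _ _ _ (by omega) hmemall,
        PySem.List.pyRange_one_cons (by omega : ((↑(4 * b) : Int) + 1) < (reviews.length : Int) * 2),
        List.foldl_cons, pv_step1 _ _ _ _ _ _ (by omega) (pv_mem_idx.mpr ⟨by omega, by omega, by omega⟩),
        hempty, List.foldl_nil,
        if_neg (by omega : ¬ ((↑(4 * b) : Int) + 1 < (reviews.length : Int) * 2 - 1))]
      conv_rhs => rw [pvAltLoop]
      rw [dif_pos (by omega : ((↑(2 * b) : Int)) < (reviews.length : Int))]
      simp only []
      rw [if_pos (by omega : ((↑(2 * b) : Int)) ≥ (reviews.length : Int) - 1),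
        if_neg (by omega : ¬ ((↑(2 * b) : Int) + 1 < (reviews.length : Int)))]
      conv_rhs => rw [pvAltLoop]
      rw [dif_neg (by omega : ¬ ((↑(2 * b) : Int) + 2 < (reviews.length : Int)))]
    · -- a full block: cells 4b .. 4b+3, then recurse
      have hlen : reviews.length = 2 * b + 2 + rest2.length := by
        have h := congrArg List.length hdrop
        simp [List.length_drop] at h
        omega
      have hdrop2 : reviews.drop (2 * (b + 1)) = rest2 := by
        have h2 := congrArg (List.drop 2) hdrop
        rw [List.drop_drop] at h2
        simpa [show 2 + 2 * b = 2 * (b + 1) by ring] using h2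
      have e1 : ((↑(4 * b) : Int) + 1 + 1 + 1 + 1) = (↑(4 * (b + 1)) : Int) := by push_cast; ring
      have e2 : ((↑(2 * b) : Int) + 1 + 1) = (↑(2 * (b + 1)) : Int) := by push_cast; ring
      have e3 : ((↑(2 * b) : Int) + 2) = (↑(2 * (b + 1)) : Int) := by push_cast; ring
      rw [PySem.List.pyRange_one_cons (by omega : ((↑(4 * b) : Int)) < (reviews.length : Int) * 2),
        List.foldl_cons, pv_step0 _ _ _ _ _ _ (by omega) hmemall,
        PySem.List.pyRange_one_cons (by omega : ((↑(4 * b) : Int) + 1) < (reviews.length : Int) * 2),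
        List.foldl_cons, pv_step1 _ _ _ _ _ _ (by omega) (pv_mem_idx.mpr ⟨by omega, by omega, by omega⟩),
        PySem.List.pyRange_one_cons (by omega : ((↑(4 * b) : Int) + 1 + 1) < (reviews.length : Int) * 2),
        List.foldl_cons, pv_step2 _ _ _ _ _ _ (by omega) (pv_mem_idx.mpr ⟨by omega, by omega, by omega⟩),
        PySem.List.pyRange_one_cons (by omega : ((↑(4 * b) : Int) + 1 + 1 + 1) < (reviews.length : Int) * 2),
        List.foldl_cons, pv_step3 _ _ _ _ _ _ (by omega) hmemall,
        if_pos (by omega : ((↑(4 * b) : Int) + 1 < (reviews.length : Int) * 2 - 1)),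
        e1, e2, ih (b + 1) rest2 _ (by simp at hm; omega) hdrop2]
      conv_rhs => rw [pvAltLoop]
      rw [dif_pos (by omega : ((↑(2 * b) : Int)) < (reviews.length : Int))]
      simp only []
      rw [if_neg (by omega : ¬ ((↑(2 * b) : Int)) ≥ (reviews.length : Int) - 1),
        if_pos (by omega : ((↑(2 * b) : Int) + 1 < (reviews.length : Int))), e3]
      by_cases hc : 2 * b + 2 < reviews.length
      · rw [if_pos (by omega : ((↑(4 * b) : Int) + 1 + 1 + 1 < (reviews.length : Int) * 2 - 1)),
          if_pos (by omega : ((↑(2 * (b + 1)) : Int) < (reviews.length : Int)))]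
      · rw [if_neg (by omega : ¬ ((↑(4 * b) : Int) + 1 + 1 + 1 < (reviews.length : Int) * 2 - 1)),
          if_neg (by omega : ¬ ((↑(2 * (b + 1)) : Int) < (reviews.length : Int)))]
        congr 1
        simp [List.append_assoc]
-- ===== VERDICT (by name: the statement is the Claim_ definition above) =====
theorem get_review_doodle_list_spec : Claim_equal_get_review_doodle_list := by
  intro reviews _
  unfold Spec_get_review_doodle_list get_review_doodle_list get_review_doodle_list_alt
  have h := pvMain reviews reviews.length 0 reviews [] le_rfl (by simp)
  simpa using h
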